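-- pv_equiv track=rewrite | github.com/ReconHawx/reconhawx | src/ct-monitor/app/protected_domain_similarity.py | _typo_suffix_hostnames
-- ===== SOURCE A (Python) =====
-- from typing import List, Optional, Tuple
--
-- _MAX_LABELS_FOR_SUFFIX_SCAN = 32
--
-- def _typo_suffix_hostnames(typo_fqdn: str) -> List[str]:
--     raw = typo_fqdn.lower().strip().rstrip(".")
--     labels = [p for p in raw.split(".") if p]
--     if not labels:
--         return []
--     if len(labels) > _MAX_LABELS_FOR_SUFFIX_SCAN:
--         labels = labels[-_MAX_LABELS_FOR_SUFFIX_SCAN:]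
--     n = len(labels)
--     if n < 2:
--         return [raw]
--     return [".".join(labels[i:]) for i in range(0, n - 1)]
-- ===== SOURCE B (Python) =====
-- from typing import List
--
-- _MAX_LABELS_FOR_SUFFIX_SCAN = 32
--
-- def _suffixes(labels):
--     # suffix hostnames of labels (len >= 2), longest first; each one is built
--     # from the previously built (shorter) suffix by a single concatenation.
--     if len(labels) == 2:
--         return [labels[0] + "." + labels[1]]
--     rest = _suffixes(labels[1:])
--     return [labels[0] + "." + rest[0]] + rest
--
-- def _typo_suffix_hostnames(typo_fqdn: str) -> List[str]:
--     raw = typo_fqdn.lower().strip().rstrip(".")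
--     labels = [p for p in raw.split(".") if p][-_MAX_LABELS_FOR_SUFFIX_SCAN:]
--     if not labels:
--         return []
--     if len(labels) == 1:
--         return [raw]
--     return _suffixes(labels)
-- ===== Notes on version B (the rewrite author's own statement) =====
-- stated objective: simpler
-- what changed: Replaces the slice-and-join comprehension (each suffix re-joined from scratch) by a structural recursion that builds each suffix from the previously built shorter suffix with one concatenation; the 32-label truncation becomes an unconditional [-32:] slice.
import Mathlib
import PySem

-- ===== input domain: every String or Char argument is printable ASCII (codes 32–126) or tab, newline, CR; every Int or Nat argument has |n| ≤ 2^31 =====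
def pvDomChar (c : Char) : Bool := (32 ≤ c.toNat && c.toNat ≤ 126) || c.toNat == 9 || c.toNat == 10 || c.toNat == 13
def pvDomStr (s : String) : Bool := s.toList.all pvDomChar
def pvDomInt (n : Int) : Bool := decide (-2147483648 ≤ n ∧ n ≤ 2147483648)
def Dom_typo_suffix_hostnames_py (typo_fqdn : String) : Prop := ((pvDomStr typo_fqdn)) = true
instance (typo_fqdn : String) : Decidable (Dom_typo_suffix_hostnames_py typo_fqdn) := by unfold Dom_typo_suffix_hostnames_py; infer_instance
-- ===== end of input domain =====

-- B replaces A's per-index slice-and-join comprehension by a structural recursion that extends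
-- the previously built suffix with one concatenation (objective: simpler).

-- hand port of s.rstrip("."), exact: removes trailing '.' characters (used by both ports, as both Pythons call it)
def pvRstripDots (cs : List Char) : List Char := (cs.reverse.dropWhile (· == '.')).reverse

-- ===== PORT A =====
def typo_suffix_hostnames_py (typo_fqdn : String) : List String :=
  let raw := pvRstripDots (PySem.Chars.strip (PySem.Chars.lower typo_fqdn.toList))
  let labels := (PySem.Chars.splitOn raw ['.']).filter (fun p => !p.isEmpty)
  if labels.isEmpty then []
  else
    let labels := if labels.length > 32 then PySem.List.slice labels (some (-32)) none else labels
    let n := labels.length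
    if n < 2 then [String.ofList raw]
    else (PySem.List.pyRange 0 ((n : Int) - 1) 1).map
      (fun i => String.ofList (PySem.Chars.join ['.'] (PySem.List.slice labels (some i) none)))

-- ===== PORT B =====
-- port of Source B's _suffixes: each suffix is the head of the recursive result, extended once
def pvSuffixes : List (List Char) → List (List Char)
  | [] => []
  | [_] => []
  | [a, b] => [a ++ '.' :: b]
  | a :: rest => (a ++ '.' :: (pvSuffixes rest).headD []) :: pvSuffixes rest

def typo_suffix_hostnames_py_alt (typo_fqdn : String) : List String :=
  let raw := pvRstripDots (PySem.Chars.strip (PySem.Chars.lower typo_fqdn.toList))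
  let labels := PySem.List.slice ((PySem.Chars.splitOn raw ['.']).filter (fun p => !p.isEmpty))
                  (some (-32)) none
  if labels.isEmpty then []
  else if labels.length == 1 then [String.ofList raw]
  else (pvSuffixes labels).map String.ofList

-- ===== PRECONDITION & SPEC =====
def Spec_typo_suffix_hostnames_py (typo_fqdn : String) (out : List String) : Prop := out = typo_suffix_hostnames_py_alt typo_fqdn
instance (typo_fqdn : String) (out : List String) : Decidable (Spec_typo_suffix_hostnames_py typo_fqdn out) := by unfold Spec_typo_suffix_hostnames_py; infer_instance

-- ===== CLAIM (what is proved, stated in full; the proofs are below) =====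
def Claim_equal_typo_suffix_hostnames_py : Prop := ∀ (typo_fqdn : String), Dom_typo_suffix_hostnames_py typo_fqdn → Spec_typo_suffix_hostnames_py typo_fqdn (typo_suffix_hostnames_py typo_fqdn)

-- ===== LEMMAS AND PROOFS =====

theorem pvSuffixes_eq (L : List (List Char)) (h : 2 ≤ L.length) :
    pvSuffixes L = (List.range (L.length - 1)).map (fun k => PySem.Chars.join ['.'] (L.drop k)) := by
  induction L with
  | nil => simp at h
  | cons a rest ih =>
    cases rest with
    | nil => simp at h
    | cons b t =>
      cases t with
      | nil =>
        simp [pvSuffixes, PySem.Chars.join_cons_cons, PySem.Chars.join_singleton]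
      | cons c u =>
        have h2 : 2 ≤ (b :: c :: u).length := by simp
        have hr := ih h2
        have hout : pvSuffixes (a :: b :: c :: u)
            = (a ++ '.' :: (pvSuffixes (b :: c :: u)).headD []) :: pvSuffixes (b :: c :: u) := by
          rfl
        have hlen : (a :: b :: c :: u).length - 1 = (b :: c :: u).length - 1 + 1 := by
          simp
        rw [hout, hr, hlen, List.range_succ_eq_map]
        simp only [List.map_cons, List.map_map, List.drop_zero]
        refine List.cons_eq_cons.mpr ⟨?_, ?_⟩
        · have hh : ((List.range ((b :: c :: u).length - 1)).map
              (fun k => PySem.Chars.join ['.'] ((b :: c :: u).drop k))).headD []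
              = PySem.Chars.join ['.'] (b :: c :: u) := by
            simp [List.range_succ_eq_map]
          rw [hh]
          simp [PySem.Chars.join_cons_cons]
        · apply List.map_congr_left
          intro k hk
          simp

-- ===== VERDICT (by name: the statement is the Claim_ definition above) =====
theorem typo_suffix_hostnames_py_spec : Claim_equal_typo_suffix_hostnames_py := by
  intro s _
  unfold Spec_typo_suffix_hostnames_py typo_suffix_hostnames_py typo_suffix_hostnames_py_alt
  set raw := pvRstripDots (PySem.Chars.strip (PySem.Chars.lower s.toList)) with hraw
  set labels0 := (PySem.Chars.splitOn raw ['.']).filter (fun p => !p.isEmpty) with hl0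
  have hslice : PySem.List.slice labels0 (some (-32)) none
      = labels0.drop (labels0.length - 32) :=
    PySem.List.slice_from_neg_ofNat labels0 32 (by norm_num)
  by_cases h0 : labels0 = []
  · rw [h0] at hslice
    simp only [List.drop_nil] at hslice
    simp only [← hl0, h0, hslice, List.isEmpty_nil, if_true]
  · have hlen0 : 0 < labels0.length := List.length_pos_iff.mpr h0
    set L := labels0.drop (labels0.length - 32) with hLdef
    have hA : (if labels0.length > 32 then L else labels0) = L := by
      split_ifs with hgt
      · rfl
      · have hz : labels0.length - 32 = 0 := by omega
        rw [hLdef, hz, List.drop_zero]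
    have hLlen : 0 < L.length := by
      rw [hLdef, List.length_drop]; omega
    have hLe : L.isEmpty = false := by
      simp only [List.isEmpty_eq_false_iff_exists_mem]
      exact List.exists_mem_of_length_pos hLlen
    have h0f : labels0.isEmpty = false := by simp [h0]
    simp only [← hl0, hslice, hA, h0f, hLe, Bool.false_eq_true, if_false]
    by_cases h1 : L.length < 2
    · have he1 : (L.length == 1) = true := by
        simp only [beq_iff_eq]; omega
      simp only [h1, if_true, he1]
    · have hge : 2 ≤ L.length := by omega
      have h1f : (L.length == 1) = false := by
        simp only [beq_eq_false_iff_ne, ne_eq]; omega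
      simp only [if_neg h1, h1f, Bool.false_eq_true, if_false]
      rw [pvSuffixes_eq L hge, PySem.List.pyRange_one, List.map_map, List.map_map]
      have ht : (((L.length : Int) - 1) - 0).toNat = L.length - 1 := by omega
      rw [ht]
      apply List.map_congr_left
      intro k hk
      simp only [Function.comp_apply]
      rw [show (0 : Int) + (k : Int) = (k : Int) from by omega,
        PySem.List.slice_from L (Int.natCast_nonneg k), Int.toNat_natCast]
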